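-- pv_equiv track=rewrite | github.com/wangzhiqun/easy-chatbi | ai/prompts.py | extract_table_references
-- ===== SOURCE A (Python) =====
-- from typing import Dict, List, Any
--
-- def extract_table_references(conversation_history: List[Dict[str, str]]) -> List[str]:
--     """Extract table names mentioned in conversation."""
--     tables = set()
--
--     for msg in conversation_history:
--         content = msg.get("content", "").lower()
--         # Simple heuristic to find table references
--         if "from " in content or "join " in content:
--             words = content.split()
--             for i, word in enumerate(words):
--                 if word in ["from", "join"] and i + 1 < len(words):
--                     table_candidate = words[i + 1].strip("(),;")
--                     tables.add(table_candidate)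
--
--     return list(tables)
-- ===== SOURCE B (Python) =====
-- def extract_table_references(conversation_history):
--     """Character-level scanner: instead of splitting the text into a word list
--     and looking ahead by index, walk the raw text once, recognise a whole-word
--     'from'/'join' at a token boundary and slice the following token out of the
--     string in place."""
--     tables = set()
--     for msg in conversation_history:
--         content = msg.get("content", "").lower()
--         if "from " in content or "join " in content:
--             n = len(content)
--             i = 0
--             prev_ws = True  # start of string counts as a boundary
--             while i < n:
--                 if prev_ws and content[i:i + 4] in ("from", "join"):
--                     j = i + 4
--                     if j < n and content[j].isspace():
--                         k = j
--                         while k < n and content[k].isspace():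
--                             k += 1
--                         if k < n:
--                             e = k
--                             while e < n and not content[e].isspace():
--                                 e += 1
--                             tables.add(content[k:e].strip("(),;"))
--                     # resume right after the keyword (its letters are non-ws)
--                     prev_ws = False
--                     i += 4
--                 else:
--                     prev_ws = content[i].isspace()
--                     i += 1
--     return list(tables)
-- ===== Notes on version B (the rewrite author's own statement) =====
-- stated objective: alternative
-- what changed: A splits each message into a word list and scans it with enumerate plus an index lookahead (words[i+1]); B never builds a word list: it walks the raw text character by character with a boundary flag, recognises a whole-word 'from'/'join' followed by whitespace, and slices the following token directly out of the string.
import Mathlib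
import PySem

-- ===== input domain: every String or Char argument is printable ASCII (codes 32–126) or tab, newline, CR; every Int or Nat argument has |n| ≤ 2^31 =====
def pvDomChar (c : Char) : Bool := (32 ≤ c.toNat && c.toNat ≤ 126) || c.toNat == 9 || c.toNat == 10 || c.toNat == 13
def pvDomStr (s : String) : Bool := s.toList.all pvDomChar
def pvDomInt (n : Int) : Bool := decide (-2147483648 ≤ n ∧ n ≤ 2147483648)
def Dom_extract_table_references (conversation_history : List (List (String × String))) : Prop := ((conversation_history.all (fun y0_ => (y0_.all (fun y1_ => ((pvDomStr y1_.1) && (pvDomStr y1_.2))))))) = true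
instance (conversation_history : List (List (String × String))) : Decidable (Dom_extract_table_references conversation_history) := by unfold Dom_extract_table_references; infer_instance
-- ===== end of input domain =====

-- B replaces A's split-into-a-word-list + enumerate/index-lookahead scan by a
-- character-level scanner over the raw text that recognises a whole-word
-- 'from'/'join' at a token boundary and slices the following token out in place
-- (objective: alternative). A returns list(set); both ports list the distinct
-- tables in first-insertion order.

-- ===== PORT A =====
-- inner loop of A: for i, word in enumerate(words): if word in ["from","join"] and i+1 < len(words): tables.add(words[i+1].strip("(),;"))
def pvInnerA (words : List String) (tables : PySem.Set String) : PySem.Set String :=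
  (PySem.List.enumerate words).foldl (fun tbls p =>
    if (["from", "join"].contains p.2) && (p.1 + 1 < (words.length : Int)) then
      match PySem.List.pyGet? words (p.1 + 1) with
      | some nxt => PySem.Set.add tbls (PySem.Str.stripChars nxt "(),;")
      | none => tbls
    else tbls) tables

def extract_table_references (conversation_history : List (List (String × String))) : List String :=
  conversation_history.foldl (fun tables msg =>
    let content := PySem.Str.lower (PySem.Dict.getD ⟨msg⟩ "content" "")
    if PySem.Str.isIn "from " content || PySem.Str.isIn "join " content then
      pvInnerA (PySem.Str.split₀ content) tables
    else tables) PySem.Set.empty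

-- ===== PORT B =====
-- Source B's while-loop over index i with the prev_ws flag, as recursion on the
-- remaining characters: 'content[i:i+4] in ("from","join")' is take 4,
-- 'i += 4' is drop 4 (= rest.drop 3 on a cons), the two inner while-loops
-- (skip whitespace, then take the token) are dropWhile / takeWhile.
def pvScanB : Bool → List Char → PySem.Set String → PySem.Set String
  | _, [], t => t
  | prevWS, c :: rest, t =>
    if prevWS && (((c :: rest).take 4) == "from".toList || ((c :: rest).take 4) == "join".toList) then
      let t' :=
        match rest.drop 3 with
        | [] => t
        | d :: _ =>
          if PySem.Chars.isspace d then
            match (rest.drop 3).dropWhile PySem.Chars.isspace with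
            | [] => t
            | after =>
              PySem.Set.add t (String.ofList (PySem.Chars.stripChars
                (after.takeWhile (fun ch => !PySem.Chars.isspace ch)) "(),;".toList))
          else t
      pvScanB false (rest.drop 3) t'
    else pvScanB (PySem.Chars.isspace c) rest t
  termination_by _ cs _ => cs.length
  decreasing_by all_goals simp [List.length_drop]

def extract_table_references_alt (conversation_history : List (List (String × String))) : List String :=
  conversation_history.foldl (fun tables msg =>
    let content := PySem.Str.lower (PySem.Dict.getD ⟨msg⟩ "content" "")
    if PySem.Str.isIn "from " content || PySem.Str.isIn "join " content then
      pvScanB true content.toList tables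
    else tables) PySem.Set.empty

-- ===== PRECONDITION & SPEC =====
def Spec_extract_table_references (conversation_history : List (List (String × String))) (out : List String) : Prop := out = extract_table_references_alt conversation_history
instance (conversation_history : List (List (String × String))) (out : List String) : Decidable (Spec_extract_table_references conversation_history out) := by unfold Spec_extract_table_references; infer_instance

-- ===== CLAIM (what is proved, stated in full; the proofs are below) =====
def Claim_equal_extract_table_references : Prop := ∀ (conversation_history : List (List (String × String))), Dom_extract_table_references conversation_history → Spec_extract_table_references conversation_history (extract_table_references conversation_history)

-- ===== LEMMAS AND PROOFS =====

def pvNonWS (c : Char) : Bool := !PySem.Chars.isspace c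

-- the raw tokens B's scanner captures, in order
def pvCapsB : Bool → List Char → List (List Char)
  | _, [] => []
  | prevWS, c :: rest =>
    if prevWS && (((c :: rest).take 4) == "from".toList || ((c :: rest).take 4) == "join".toList) then
      (match rest.drop 3 with
       | [] => []
       | d :: _ =>
         if PySem.Chars.isspace d then
           match (rest.drop 3).dropWhile PySem.Chars.isspace with
           | [] => []
           | after => [after.takeWhile pvNonWS]
         else []) ++ pvCapsB false (rest.drop 3)
    else pvCapsB (PySem.Chars.isspace c) rest
  termination_by _ cs => cs.length
  decreasing_by all_goals simp [List.length_drop]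

def pvAddStrip (t : PySem.Set String) (w : List Char) : PySem.Set String :=
  PySem.Set.add t (String.ofList (PySem.Chars.stripChars w "(),;".toList))

lemma pvScanB_eq_caps_aux : ∀ (n : Nat) (cs : List Char), cs.length ≤ n →
    ∀ (prev : Bool) (t : PySem.Set String),
    pvScanB prev cs t = (pvCapsB prev cs).foldl pvAddStrip t := by
  intro n
  induction n with
  | zero =>
      intro cs hlen prev t
      have hcs : cs = [] := List.eq_nil_of_length_eq_zero (by omega)
      subst hcs; simp [pvScanB, pvCapsB]
  | succ n ih =>
      intro cs hlen prev t
      match cs with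
      | [] => simp [pvScanB, pvCapsB]
      | c :: rest =>
        have hrest : rest.length ≤ n := by simp at hlen; omega
        rw [pvScanB, pvCapsB]
        by_cases hc : (prev && (((c :: rest).take 4) == "from".toList || ((c :: rest).take 4) == "join".toList)) = true
        · rw [if_pos hc, if_pos hc, List.foldl_append]
          have hdl : (List.drop 3 rest).length ≤ rest.length := by
            rw [List.length_drop]; omega
          cases hd : List.drop 3 rest with
          | nil =>
              dsimp only
              rw [ih [] (by simp) false t]
              simp [pvCapsB]
          | cons d tl =>
              have hdt : (d :: tl).length ≤ n := by rw [hd] at hdl; omega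
              dsimp only
              by_cases hws : PySem.Chars.isspace d = true
              · simp only [hws, if_pos]
                cases ha : List.dropWhile PySem.Chars.isspace (d :: tl) with
                | nil =>
                    rw [ih _ hdt]
                    simp
                | cons a as =>
                    rw [ih _ hdt]
                    rfl
              · simp only [hws]
                rw [ih _ hdt]
                simp
        · rw [if_neg hc, if_neg hc]
          exact ih rest hrest _ t

lemma pvScanB_eq_caps (prev : Bool) (cs : List Char) (t : PySem.Set String) :
    pvScanB prev cs t = (pvCapsB prev cs).foldl pvAddStrip t :=
  pvScanB_eq_caps_aux cs.length cs le_rfl prev t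

-- clean whitespace split (proved equal to PySem.Chars.split₀ below)
def pvWsplit : List Char → List (List Char)
  | [] => []
  | c :: rest =>
    if PySem.Chars.isspace c then pvWsplit rest
    else (c :: rest.takeWhile pvNonWS) :: pvWsplit (rest.dropWhile pvNonWS)
  termination_by cs => cs.length
  decreasing_by
    · simp
    · simp [List.length_dropWhile_le]

def pvKwC (w : List Char) : Bool := w == "from".toList || w == "join".toList

-- the token after each keyword token, char-list level
def pvCandsC : List (List Char) → List (List Char)
  | [] => []
  | w :: ws => (if pvKwC w then (match ws with | [] => [] | nxt :: _ => [nxt]) else []) ++ pvCandsC ws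

lemma pvTake4_not_kw {c : Char} (rest : List Char) (h : PySem.Chars.isspace c = true) :
    (((c :: rest).take 4) == "from".toList || ((c :: rest).take 4) == "join".toList) = false := by
  by_cases hcf : c = 'f'
  · subst hcf; exact absurd h (by decide)
  by_cases hcj : c = 'j'
  · subst hcj; exact absurd h (by decide)
  have h4 : (c :: rest).take 4 = c :: rest.take 3 := rfl
  rw [h4, show "from".toList = ['f','r','o','m'] from rfl, show "join".toList = ['j','o','i','n'] from rfl]
  simp [hcf, hcj]

lemma pvCandsC_cons (w : List Char) (ws : List (List Char)) :
    pvCandsC (w :: ws) = (if pvKwC w then (match ws with | [] => [] | nxt :: _ => [nxt]) else []) ++ pvCandsC ws := rfl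

lemma pvCapsB_false (cs : List Char) :
    pvCapsB false cs = pvCapsB true (cs.dropWhile pvNonWS) := by
  induction cs with
  | nil => simp [pvCapsB]
  | cons c rest ih =>
      by_cases hws : PySem.Chars.isspace c = true
      · have hnw : pvNonWS c = false := by simp [pvNonWS, hws]
        have hx := pvTake4_not_kw rest hws
        rw [List.dropWhile_cons_of_neg (by simp [hnw])]
        conv_lhs => rw [pvCapsB]
        conv_rhs => rw [pvCapsB]
        rw [if_neg (by simp), if_neg (by rw [Bool.true_and, hx]; simp), hws]
      · have hnw : pvNonWS c = true := by simp [pvNonWS, hws]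
        have hws' : PySem.Chars.isspace c = false := by simpa using hws
        rw [List.dropWhile_cons_of_pos (by simp [hnw])]
        conv_lhs => rw [pvCapsB]
        rw [if_neg (by simp), hws']
        exact ih

lemma pvWsplit_ws_nil (u : List Char) (h : u.dropWhile PySem.Chars.isspace = []) :
    pvWsplit u = [] := by
  induction u with
  | nil => simp [pvWsplit]
  | cons c rest ih =>
      by_cases hws : PySem.Chars.isspace c = true
      · rw [List.dropWhile_cons_of_pos (by simp [hws])] at h
        rw [pvWsplit, if_pos hws]
        exact ih h
      · rw [List.dropWhile_cons_of_neg (by simp [hws])] at h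
        exact absurd h (by simp)

lemma pvWsplit_ws (u : List Char) (a : Char) (as : List Char)
    (h : u.dropWhile PySem.Chars.isspace = a :: as) :
    pvWsplit u = ((a :: as).takeWhile pvNonWS) :: pvWsplit ((a :: as).dropWhile pvNonWS) := by
  induction u with
  | nil => simp at h
  | cons c rest ih =>
      by_cases hws : PySem.Chars.isspace c = true
      · rw [List.dropWhile_cons_of_pos (by simp [hws])] at h
        rw [pvWsplit, if_pos hws]
        exact ih h
      · rw [List.dropWhile_cons_of_neg (by simp [hws])] at h
        obtain ⟨rfl, rfl⟩ : c = a ∧ rest = as := by simpa using h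
        rw [pvWsplit, if_neg (by simp [hws])]
        have hnw : pvNonWS c = true := by simp [pvNonWS, hws]
        rw [List.takeWhile_cons_of_pos (by simp [hnw]), List.dropWhile_cons_of_pos (by simp [hnw])]

lemma pvCapsB_true_aux : ∀ (n : Nat) (cs : List Char), cs.length ≤ n →
    pvCapsB true cs = pvCandsC (pvWsplit cs) := by
  intro n
  induction n with
  | zero =>
      intro cs h
      have hcs : cs = [] := List.eq_nil_of_length_eq_zero (by omega)
      subst hcs; simp [pvCapsB, pvWsplit, pvCandsC]
  | succ n ih =>
      intro cs hlen
      match cs with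
      | [] => simp [pvCapsB, pvWsplit, pvCandsC]
      | c :: rest =>
        have hrest : rest.length ≤ n := by simp at hlen; omega
        by_cases hws : PySem.Chars.isspace c = true
        · have hx := pvTake4_not_kw rest hws
          conv_lhs => rw [pvCapsB]
          rw [if_neg (by rw [Bool.true_and, hx]; simp), hws, pvWsplit, if_pos hws]
          exact ih rest hrest
        · by_cases hcond : (((c :: rest).take 4) == "from".toList || ((c :: rest).take 4) == "join".toList) = true
          · -- a whole-token keyword starts here
            have hdec : (c = 'f' ∧ rest.take 3 = ['r','o','m']) ∨ (c = 'j' ∧ rest.take 3 = ['o','i','n']) := by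
              rcases (by simpa using hcond :
                  (c :: rest).take 4 = "from".toList ∨ (c :: rest).take 4 = "join".toList) with h | h
              · left
                have h' : c :: rest.take 3 = ['f','r','o','m'] := h
                simpa using h'
              · right
                have h' : c :: rest.take 3 = ['j','o','i','n'] := h
                simpa using h'
            rcases hdec with ⟨hc, h3⟩ | ⟨hc, h3⟩
            · subst hc
              obtain ⟨tail, htail⟩ : ∃ tail, rest = rest.take 3 ++ tail :=
                ⟨rest.drop 3, (List.take_append_drop 3 rest).symm⟩
              rw [h3] at htail
              subst htail
              simp only [List.cons_append, List.nil_append] at hcond ⊢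
              have htw : List.takeWhile pvNonWS ('r' :: 'o' :: 'm' :: tail)
                  = 'r' :: 'o' :: 'm' :: List.takeWhile pvNonWS tail := by
                simp [pvNonWS, PySem.Chars.isspace]
              have hdw : List.dropWhile pvNonWS ('r' :: 'o' :: 'm' :: tail)
                  = List.dropWhile pvNonWS tail := by
                simp [pvNonWS, PySem.Chars.isspace]
              have htail_len : tail.length ≤ n := by simp at hlen; omega
              conv_lhs => rw [pvCapsB]
              rw [if_pos (by rw [Bool.true_and]; exact hcond),
                  pvWsplit, if_neg (by simp [hws]), htw, hdw]
              simp only [List.drop_succ_cons, List.drop_zero]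
              cases tail with
              | nil =>
                  simp only [List.takeWhile_nil, List.dropWhile_nil]
                  rw [pvWsplit, pvCandsC]
                  cases hkw : pvKwC _ <;> simp [pvCapsB, pvCandsC]
              | cons d t =>
                  by_cases hwd : PySem.Chars.isspace d = true
                  · rw [show List.takeWhile pvNonWS (d :: t) = [] from
                          List.takeWhile_cons_of_neg (by simp [pvNonWS, hwd]),
                        show List.dropWhile pvNonWS (d :: t) = d :: t from
                          List.dropWhile_cons_of_neg (by simp [pvNonWS, hwd])]
                    have hfb := pvCapsB_false (d :: t)
                    rw [show List.dropWhile pvNonWS (d :: t) = d :: t from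
                          List.dropWhile_cons_of_neg (by simp [pvNonWS, hwd])] at hfb
                    cases hv : List.dropWhile PySem.Chars.isspace (d :: t) with
                    | nil =>
                        dsimp only
                        rw [hwd, if_pos rfl]
                        rw [pvWsplit_ws_nil _ hv]
                        rw [hfb, ih (d :: t) (by simpa using htail_len), pvWsplit_ws_nil _ hv]
                        simp [pvCandsC]
                    | cons a as =>
                        show (if PySem.Chars.isspace d = true
                            then [List.takeWhile pvNonWS (a :: as)] else []) ++
                          pvCapsB false (d :: t) = _
                        rw [if_pos hwd]
                        rw [pvWsplit_ws _ _ _ hv]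
                        rw [pvCandsC_cons, if_pos (by decide)]
                        rw [hfb, ih (d :: t) (by simpa using htail_len), pvWsplit_ws _ _ _ hv]
                  · rw [show List.takeWhile pvNonWS (d :: t) = d :: List.takeWhile pvNonWS t from
                          List.takeWhile_cons_of_pos (by simp [pvNonWS, hwd]),
                        show List.dropWhile pvNonWS (d :: t) = List.dropWhile pvNonWS t from
                          List.dropWhile_cons_of_pos (by simp [pvNonWS, hwd])]
                    have hkwf : pvKwC ('f' :: 'r' :: 'o' :: 'm' :: d :: List.takeWhile pvNonWS t) = false := by
                      simp only [pvKwC, Bool.or_eq_false_iff]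
                      constructor <;> · rw [beq_eq_false_iff_ne]
                                        intro h
                                        have hl := congrArg List.length h
                                        simp at hl
                    rw [pvCandsC_cons, hkwf]
                    have hfb := pvCapsB_false (d :: t)
                    rw [show List.dropWhile pvNonWS (d :: t) = List.dropWhile pvNonWS t from
                          List.dropWhile_cons_of_pos (by simp [pvNonWS, hwd])] at hfb
                    have hdt : (List.dropWhile pvNonWS t).length ≤ n := by
                      have h1 := List.length_dropWhile_le pvNonWS t
                      simp at htail_len; omega
                    dsimp only
                    rw [if_neg hwd]
                    rw [hfb, ih _ hdt]
                    simp
            · subst hc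
              obtain ⟨tail, htail⟩ : ∃ tail, rest = rest.take 3 ++ tail :=
                ⟨rest.drop 3, (List.take_append_drop 3 rest).symm⟩
              rw [h3] at htail
              subst htail
              simp only [List.cons_append, List.nil_append] at hcond ⊢
              have htw : List.takeWhile pvNonWS ('o' :: 'i' :: 'n' :: tail)
                  = 'o' :: 'i' :: 'n' :: List.takeWhile pvNonWS tail := by
                simp [pvNonWS, PySem.Chars.isspace]
              have hdw : List.dropWhile pvNonWS ('o' :: 'i' :: 'n' :: tail)
                  = List.dropWhile pvNonWS tail := by
                simp [pvNonWS, PySem.Chars.isspace]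
              have htail_len : tail.length ≤ n := by simp at hlen; omega
              conv_lhs => rw [pvCapsB]
              rw [if_pos (by rw [Bool.true_and]; exact hcond),
                  pvWsplit, if_neg (by simp [hws]), htw, hdw]
              simp only [List.drop_succ_cons, List.drop_zero]
              cases tail with
              | nil =>
                  simp only [List.takeWhile_nil, List.dropWhile_nil]
                  rw [pvWsplit, pvCandsC]
                  cases hkw : pvKwC _ <;> simp [pvCapsB, pvCandsC]
              | cons d t =>
                  by_cases hwd : PySem.Chars.isspace d = true
                  · rw [show List.takeWhile pvNonWS (d :: t) = [] from
                          List.takeWhile_cons_of_neg (by simp [pvNonWS, hwd]),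
                        show List.dropWhile pvNonWS (d :: t) = d :: t from
                          List.dropWhile_cons_of_neg (by simp [pvNonWS, hwd])]
                    have hfb := pvCapsB_false (d :: t)
                    rw [show List.dropWhile pvNonWS (d :: t) = d :: t from
                          List.dropWhile_cons_of_neg (by simp [pvNonWS, hwd])] at hfb
                    cases hv : List.dropWhile PySem.Chars.isspace (d :: t) with
                    | nil =>
                        dsimp only
                        rw [hwd, if_pos rfl]
                        rw [pvWsplit_ws_nil _ hv]
                        rw [hfb, ih (d :: t) (by simpa using htail_len), pvWsplit_ws_nil _ hv]
                        simp [pvCandsC]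
                    | cons a as =>
                        show (if PySem.Chars.isspace d = true
                            then [List.takeWhile pvNonWS (a :: as)] else []) ++
                          pvCapsB false (d :: t) = _
                        rw [if_pos hwd]
                        rw [pvWsplit_ws _ _ _ hv]
                        rw [pvCandsC_cons, if_pos (by decide)]
                        rw [hfb, ih (d :: t) (by simpa using htail_len), pvWsplit_ws _ _ _ hv]
                  · rw [show List.takeWhile pvNonWS (d :: t) = d :: List.takeWhile pvNonWS t from
                          List.takeWhile_cons_of_pos (by simp [pvNonWS, hwd]),
                        show List.dropWhile pvNonWS (d :: t) = List.dropWhile pvNonWS t from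
                          List.dropWhile_cons_of_pos (by simp [pvNonWS, hwd])]
                    have hkwf : pvKwC ('j' :: 'o' :: 'i' :: 'n' :: d :: List.takeWhile pvNonWS t) = false := by
                      simp only [pvKwC, Bool.or_eq_false_iff]
                      constructor <;> · rw [beq_eq_false_iff_ne]
                                        intro h
                                        have hl := congrArg List.length h
                                        simp at hl
                    rw [pvCandsC_cons, hkwf]
                    have hfb := pvCapsB_false (d :: t)
                    rw [show List.dropWhile pvNonWS (d :: t) = List.dropWhile pvNonWS t from
                          List.dropWhile_cons_of_pos (by simp [pvNonWS, hwd])] at hfb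
                    have hdt : (List.dropWhile pvNonWS t).length ≤ n := by
                      have h1 := List.length_dropWhile_le pvNonWS t
                      simp at htail_len; omega
                    dsimp only
                    rw [if_neg hwd]
                    rw [hfb, ih _ hdt]
                    simp
          · -- an ordinary token starts here
            have hws' : PySem.Chars.isspace c = false := by simpa using hws
            conv_lhs => rw [pvCapsB]
            rw [if_neg (by rw [Bool.true_and]; exact (by simpa using hcond)), hws']
            rw [pvCapsB_false, pvWsplit, if_neg (by simp [hws])]
            have hdr : (rest.dropWhile pvNonWS).length ≤ n :=
              le_trans (List.length_dropWhile_le pvNonWS rest) hrest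
            rw [ih _ hdr, pvCandsC_cons]
            cases hkw : pvKwC (c :: rest.takeWhile pvNonWS) with
            | false => simp
            | true =>
                exfalso
                rcases (by simpa [pvKwC] using hkw :
                    (c :: rest.takeWhile pvNonWS) = "from".toList ∨
                      (c :: rest.takeWhile pvNonWS) = "join".toList) with h | h <;>
                · have hpre : (c :: rest.takeWhile pvNonWS) <+: (c :: rest) :=
                    ⟨rest.dropWhile pvNonWS, by simp [List.takeWhile_append_dropWhile]⟩
                  have hlen4 : (c :: rest.takeWhile pvNonWS).length = 4 := by rw [h]; rfl
                  have htk : (c :: rest).take 4 = c :: rest.takeWhile pvNonWS := by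
                    rw [← hlen4]
                    exact (List.prefix_iff_eq_take.mp hpre).symm
                  exact hcond (by rw [htk, h]; simp)

lemma pvCapsB_true (cs : List Char) :
    pvCapsB true cs = pvCandsC (pvWsplit cs) :=
  pvCapsB_true_aux cs.length cs le_rfl

lemma pvGo_spec : ∀ (s cur : List Char) (accs : List (List Char)),
    PySem.Chars.split₀.go s cur accs = accs.reverse ++
      (if cur.isEmpty then pvWsplit s
       else (cur.reverse ++ s.takeWhile pvNonWS) :: pvWsplit (s.dropWhile pvNonWS)) := by
  intro s
  induction s with
  | nil =>
      intro cur accs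
      cases cur <;> simp [PySem.Chars.split₀.go, pvWsplit]
  | cons c rest ih =>
      intro cur accs
      by_cases hws : PySem.Chars.isspace c = true
      · rw [PySem.Chars.split₀.go, if_pos hws]
        have hpw : pvWsplit (c :: rest) = pvWsplit rest := by rw [pvWsplit, if_pos hws]
        have htk : List.takeWhile pvNonWS (c :: rest) = [] :=
          List.takeWhile_cons_of_neg (by simp [pvNonWS, hws])
        have hdr : List.dropWhile pvNonWS (c :: rest) = c :: rest :=
          List.dropWhile_cons_of_neg (by simp [pvNonWS, hws])
        cases cur with
        | nil => simp [ih, hpw]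
        | cons x xs => simp [ih, hpw, htk, hdr]
      · rw [PySem.Chars.split₀.go, if_neg hws]
        have hnw : pvNonWS c = true := by simp [pvNonWS, hws]
        have hpw : pvWsplit (c :: rest) =
            (c :: rest.takeWhile pvNonWS) :: pvWsplit (rest.dropWhile pvNonWS) := by
          rw [pvWsplit, if_neg hws]
        have htk : List.takeWhile pvNonWS (c :: rest) = c :: rest.takeWhile pvNonWS :=
          List.takeWhile_cons_of_pos (by simp [hnw])
        have hdr : List.dropWhile pvNonWS (c :: rest) = rest.dropWhile pvNonWS :=
          List.dropWhile_cons_of_pos (by simp [hnw])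
        cases cur with
        | nil => simp [ih, hpw, htk, hdr]
        | cons x xs => simp [ih, hpw, htk, hdr]

lemma pvWsplit_eq_split₀ (cs : List Char) : PySem.Chars.split₀ cs = pvWsplit cs := by
  simp [PySem.Chars.split₀, pvGo_spec]

-- A-side harvest at String level (from the proof of pvInnerA_eq)
def pvKw (w : String) : Bool := w == "from" || w == "join"

def pvFirst : List String → List String
  | [] => []
  | w :: _ => [PySem.Str.stripChars w "(),;"]

def pvCands : List String → List String
  | [] => []
  | w :: ws => (if pvKw w then pvFirst ws else []) ++ pvCands ws

lemma pvInnerA_eq (ws : List String) : ∀ (pre : List String) (tbls : PySem.Set String),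
    (PySem.List.enumerate ws (pre.length : Int)).foldl (fun tbls p =>
      if (["from", "join"].contains p.2) && (p.1 + 1 < (((pre ++ ws).length : Nat) : Int)) then
        match PySem.List.pyGet? (pre ++ ws) (p.1 + 1) with
        | some nxt => PySem.Set.add tbls (PySem.Str.stripChars nxt "(),;")
        | none => tbls
      else tbls) tbls = (pvCands ws).foldl PySem.Set.add tbls := by
  induction ws with
  | nil => intro pre tbls; simp [pvCands, PySem.List.enumerate_nil]
  | cons w ws ih =>
      intro pre tbls
      rw [PySem.List.enumerate_cons]
      simp only [List.foldl_cons]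
      have hkw : (["from", "join"].contains w) = pvKw w := by
        simp only [pvKw]
        cases hw1 : w == "from" <;> cases hw2 : w == "join" <;> simp_all
      have hfirst : (if (["from", "join"].contains w) && ((pre.length : Int) + 1 < (((pre ++ w :: ws).length : Nat) : Int)) then
            match PySem.List.pyGet? (pre ++ w :: ws) ((pre.length : Int) + 1) with
            | some nxt => PySem.Set.add tbls (PySem.Str.stripChars nxt "(),;")
            | none => tbls
          else tbls) = (if pvKw w then pvFirst ws else []).foldl PySem.Set.add tbls := by
        rw [hkw]
        cases ws with
        | nil =>
            have hnp : ¬ ((pre.length : Int) + 1 < (((pre ++ [w]).length : Nat) : Int)) := by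
              simp
            cases hw : pvKw w <;> simp [pvFirst]
        | cons n ns =>
            have hp : ((pre.length : Int) + 1 < (((pre ++ w :: n :: ns).length : Nat) : Int)) := by
              simp only [List.length_append, List.length_cons]
              push_cast
              omega
            have hget : PySem.List.pyGet? (pre ++ w :: n :: ns) ((pre.length : Int) + 1) = some n := by
              have h1 : ((pre.length : Int) + 1) = ((pre.length + 1 : Nat) : Int) := by push_cast; ring
              rw [h1, PySem.List.pyGet?_natCast]
              rw [show pre ++ w :: n :: ns = (pre ++ [w]) ++ n :: ns by simp]
              rw [List.getElem?_append_right (by simp)]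
              simp
            cases hw : pvKw w <;> simp [hget, pvFirst]
      rw [hfirst]
      have h2 := ih (pre ++ [w]) ((if pvKw w then pvFirst ws else []).foldl PySem.Set.add tbls)
      rw [show (pre ++ [w]) ++ ws = pre ++ w :: ws by simp] at h2
      rw [show (((pre ++ [w]).length : Nat) : Int) = (pre.length : Int) + 1 by simp] at h2
      rw [h2]
      rw [show pvCands (w :: ws) = (if pvKw w then pvFirst ws else []) ++ pvCands ws from rfl,
        List.foldl_append]

-- bridge: A's String-level candidates are B's char-level candidates, stripped
lemma pvBeq_ofList (l : List Char) (s : String) : (String.ofList l == s) = (l == s.toList) := by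
  rcases Bool.eq_false_or_eq_true (l == s.toList) with h | h <;> simp_all [String.ofList_eq]

lemma pvCands_map_ofList (ws : List (List Char)) :
    pvCands (ws.map String.ofList) =
      (pvCandsC ws).map (fun w => String.ofList (PySem.Chars.stripChars w "(),;".toList)) := by
  induction ws with
  | nil => rfl
  | cons w ws ih =>
      simp only [List.map_cons]
      rw [show pvCands (String.ofList w :: ws.map String.ofList) =
            (if pvKw (String.ofList w) then pvFirst (ws.map String.ofList) else []) ++
              pvCands (ws.map String.ofList) from rfl,
          pvCandsC_cons, ih]
      have hkw : pvKw (String.ofList w) = pvKwC w := by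
        simp only [pvKw, pvKwC, pvBeq_ofList]
      rw [hkw, List.map_append]
      cases hk : pvKwC w
      · simp
      · cases ws with
        | nil => simp [pvFirst]
        | cons nxt ns => simp [pvFirst, PySem.Str.stripChars]

-- per-message agreement
lemma pvStep_eq (content : String) (t : PySem.Set String) :
    pvScanB true content.toList t = pvInnerA (PySem.Str.split₀ content) t := by
  have hA := pvInnerA_eq (PySem.Str.split₀ content) [] t
  simp only [List.length_nil, Nat.cast_zero, List.nil_append] at hA
  have hA' : pvInnerA (PySem.Str.split₀ content) t
      = (pvCands (PySem.Str.split₀ content)).foldl PySem.Set.add t := by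
    simpa only [pvInnerA] using hA
  rw [hA', pvScanB_eq_caps, pvCapsB_true, ← pvWsplit_eq_split₀]
  rw [show PySem.Str.split₀ content = (PySem.Chars.split₀ content.toList).map String.ofList from rfl]
  rw [pvCands_map_ofList, List.foldl_map]
  rfl

-- ===== VERDICT (by name: the statement is the Claim_ definition above) =====
theorem extract_table_references_spec : Claim_equal_extract_table_references := by
  intro h _
  show extract_table_references h = extract_table_references_alt h
  unfold extract_table_references extract_table_references_alt
  have hstep : (fun (tables : PySem.Set String) (msg : List (String × String)) =>
      let content := PySem.Str.lower (PySem.Dict.getD ⟨msg⟩ "content" "")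
      if PySem.Str.isIn "from " content || PySem.Str.isIn "join " content then
        pvInnerA (PySem.Str.split₀ content) tables
      else tables)
    = (fun (tables : PySem.Set String) (msg : List (String × String)) =>
      let content := PySem.Str.lower (PySem.Dict.getD ⟨msg⟩ "content" "")
      if PySem.Str.isIn "from " content || PySem.Str.isIn "join " content then
        pvScanB true content.toList tables
      else tables) := by
    funext t msg
    dsimp only
    split
    · exact (pvStep_eq _ t).symm
    · rfl
  rw [hstep]
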